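-- pv_equiv track=rewrite | github.com/ianfife/python-snippets | Class/VigenereCipherV2.py | create_key_word_list
-- ===== SOURCE A (Python) =====
-- symbols = 'abcdefghijklmnopqrstuvwxyz'
--
-- def create_key_word_list(key_word, plain_text):
--     key_word_index = 0
--     key_word_list = ""
--
--     for char in plain_text:
--         # Only add on to the key word list if
--         # the character is a supported character
--         if char in symbols:
--             key_word_list += key_word[key_word_index % len(key_word)]
--             key_word_index += 1
--     return key_word_list
-- ===== SOURCE B (Python) =====
-- symbols = 'abcdefghijklmnopqrstuvwxyz'
--
-- def create_key_word_list(key_word, plain_text):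
--     n = 0
--     for ch in plain_text:
--         if ch in symbols:
--             n += 1
--     return ''.join(key_word[i % len(key_word)] for i in range(n))
-- ===== Notes on version B (the rewrite author's own statement) =====
-- stated objective: alternative
-- what changed: B splits A's single interleaved scan into two phases: a counting pass over plain_text, then a generation loop over range(n) that builds the repeated key purely from the count without touching plain_text.
import Mathlib
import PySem

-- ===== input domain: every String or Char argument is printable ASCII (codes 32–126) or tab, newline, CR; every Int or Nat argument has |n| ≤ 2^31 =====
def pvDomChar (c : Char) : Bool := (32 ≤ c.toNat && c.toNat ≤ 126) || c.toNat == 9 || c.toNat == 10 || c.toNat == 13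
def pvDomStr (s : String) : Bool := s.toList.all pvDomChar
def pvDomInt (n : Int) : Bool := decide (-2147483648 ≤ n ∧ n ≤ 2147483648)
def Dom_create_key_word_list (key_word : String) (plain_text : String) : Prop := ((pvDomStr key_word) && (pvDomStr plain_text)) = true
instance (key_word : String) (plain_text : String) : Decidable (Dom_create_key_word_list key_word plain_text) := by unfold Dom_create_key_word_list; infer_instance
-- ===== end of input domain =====

-- File claim: A builds the repeating-key string in one interleaved scan of plain_text;
-- B first counts the supported characters, then generates the key string from the count alone.

-- ===== PORT A =====
-- module constant symbols = 'abcdefghijklmnopqrstuvwxyz'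
def pvSymbols : List Char := "abcdefghijklmnopqrstuvwxyz".toList

-- key_word[key_word_index % len(key_word)] ; under Pre_ the key is nonempty here, so pyGetD is exact
def pvKeyChar (kw : List Char) (i : Int) : Char :=
  PySem.List.pyGetD kw (PySem.Int.mod i (kw.length : Int)) ' '

-- literal port of A's for-loop: state = (key_word_index, key_word_list)
def create_key_word_list (key_word : String) (plain_text : String) : String :=
  let st := plain_text.toList.foldl
    (fun (st : Int × List Char) c =>
      if PySem.Chars.isIn [c] pvSymbols then
        (st.1 + 1, st.2 ++ [pvKeyChar key_word.toList st.1])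
      else st)
    (0, [])
  String.ofList st.2

-- ===== PORT B =====
-- phase 1: count supported characters; phase 2: join over range(n)
def create_key_word_list_alt (key_word : String) (plain_text : String) : String :=
  let n : Int := plain_text.toList.foldl
    (fun acc c => if PySem.Chars.isIn [c] pvSymbols then acc + 1 else acc) 0
  String.ofList ((PySem.List.pyRange 0 n 1).map (fun i => pvKeyChar key_word.toList i))

-- ===== PRECONDITION & SPEC =====
-- Pre_ excludes only the inputs where Python A raises ZeroDivisionError (key_word empty while
-- plain_text contains at least one supported character); Python B raises there too.
def Pre_create_key_word_list (key_word : String) (plain_text : String) : Prop :=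
  key_word.toList ≠ [] ∨ plain_text.toList.all (fun c => !(PySem.Chars.isIn [c] pvSymbols)) = true
instance (key_word : String) (plain_text : String) : Decidable (Pre_create_key_word_list key_word plain_text) := by unfold Pre_create_key_word_list; infer_instance

def pvWitness_create_key_word_list : String × String := ("key", "hello world")

def Spec_create_key_word_list (key_word : String) (plain_text : String) (out : String) : Prop := out = create_key_word_list_alt key_word plain_text
instance (key_word : String) (plain_text : String) (out : String) : Decidable (Spec_create_key_word_list key_word plain_text out) := by unfold Spec_create_key_word_list; infer_instance

-- ===== CLAIM (what is proved, stated in full; the proofs are below) =====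
def Claim_equal_create_key_word_list : Prop := ∀ (key_word : String) (plain_text : String), Dom_create_key_word_list key_word plain_text → Pre_create_key_word_list key_word plain_text → Spec_create_key_word_list key_word plain_text (create_key_word_list key_word plain_text)

-- ===== LEMMAS AND PROOFS =====

-- A's loop invariant: starting from index i ≥ 0 with accumulator acc, the fold appends exactly
-- the key characters at indices i, i+1, …, i+countP−1.
theorem pvLoopA (kw : List Char) (l : List Char) (i : Int) (acc : List Char) (hi : 0 ≤ i) :
    l.foldl
      (fun (st : Int × List Char) c =>
        if PySem.Chars.isIn [c] pvSymbols then
          (st.1 + 1, st.2 ++ [pvKeyChar kw st.1])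
        else st)
      (i, acc)
    = (i + (l.countP (fun c => PySem.Chars.isIn [c] pvSymbols) : Int),
       acc ++ (PySem.List.pyRange i (i + (l.countP (fun c => PySem.Chars.isIn [c] pvSymbols) : Int)) 1).map (fun j => pvKeyChar kw j)) := by
  induction l generalizing i acc with
  | nil =>
      simp [PySem.List.pyRange_one_eq_nil (le_refl i)]
  | cons c l ih =>
      by_cases h : PySem.Chars.isIn [c] pvSymbols
      · have hc : ((c :: l).countP (fun c => PySem.Chars.isIn [c] pvSymbols) : Int)
            = (l.countP (fun c => PySem.Chars.isIn [c] pvSymbols) : Int) + 1 := by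
          simp [h]
        simp only [List.foldl_cons, h, if_pos]
        rw [ih (i + 1) (acc ++ [pvKeyChar kw i]) (by omega), hc]
        have hlt : i < i + ((l.countP (fun c => PySem.Chars.isIn [c] pvSymbols) : Int) + 1) := by
          have : (0:Int) ≤ (l.countP (fun c => PySem.Chars.isIn [c] pvSymbols) : Int) := by positivity
          omega
        have he : i + 1 + (l.countP (fun c => PySem.Chars.isIn [c] pvSymbols) : Int)
            = i + ((l.countP (fun c => PySem.Chars.isIn [c] pvSymbols) : Int) + 1) := by ring
        rw [PySem.List.pyRange_one_cons hlt, he]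
        simp
      · simp only [List.foldl_cons, h, if_neg, Bool.false_eq_true, not_false_iff]
        rw [ih i acc hi]
        simp [h]

theorem create_key_word_list_eq (key_word plain_text : String) :
    create_key_word_list key_word plain_text = create_key_word_list_alt key_word plain_text := by
  unfold create_key_word_list create_key_word_list_alt
  rw [pvLoopA key_word.toList plain_text.toList 0 [] (le_refl 0)]
  rw [PySem.List.foldl_if_add_one (fun c => PySem.Chars.isIn [c] pvSymbols) plain_text.toList 0]
  simp

-- ===== VERDICT (by name: the statement is the Claim_ definition above) =====
theorem create_key_word_list_spec : Claim_equal_create_key_word_list := by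
  intro kw pt _ _
  unfold Spec_create_key_word_list
  exact create_key_word_list_eq kw pt
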